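-- pv_equiv track=rewrite | github.com/thehalleyyoung/halley-labs | ml-pipeline-leakage-auditor/implementation/src/taintflow/utils/graph_utils.py | find_back_edges
-- ===== SOURCE A (Python) =====
-- from typing import (
--     Any,
--     Callable,
--     Deque,
--     Dict,
--     FrozenSet,
--     Generic,
--     Hashable,
--     Iterable,
--     Iterator,
--     List,
--     Mapping,
--     Optional,
--     Sequence,
--     Set,
--     Tuple,
--     TypeVar,
-- )
--
-- N = TypeVar("N", bound=Hashable)
--
-- def find_back_edges(
--     graph: Mapping[N, Sequence[N]],
-- ) -> List[Tuple[N, N]]: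
--     """Detect back edges (cycle-causing edges) via DFS classification.
--
--     Parameters
--     ----------
--     graph : mapping node → list of successors
--
--     Returns
--     -------
--     list of (src, dst)
--         Edges where *dst* is an ancestor of *src* in the DFS tree.
--     """
--     WHITE, GRAY, BLACK = 0, 1, 2
--     color: Dict[N, int] = {n: WHITE for n in graph}
--     back_edges: List[Tuple[N, N]] = []
--
--     for start in list(graph):
--         if color.get(start, WHITE) != WHITE:
--             continue
--         stack: List[Tuple[N, int]] = [(start, 0)]
--         color[start] = GRAY
--         while stack:
--             node, idx = stack.pop()
--             children = list(graph.get(node, []))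
--             if idx < len(children):
--                 stack.append((node, idx + 1))
--                 child = children[idx]
--                 c = color.get(child, WHITE)
--                 if c == WHITE:
--                     color[child] = GRAY
--                     stack.append((child, 0))
--                 elif c == GRAY:
--                     back_edges.append((node, child))
--             else:
--                 color[node] = BLACK
--
--     return back_edges
-- ===== SOURCE B (Python) =====
-- def find_back_edges(graph):
--     """Detect back edges via an event-driven DFS: one explicit stack of
--     ('exit', node) / ('edge', src, dst) events, each edge classified when its
--     event is popped, so no (node, index) frames are re-pushed and no successor
--     list is rebuilt per edge."""
--     color = {}  # absent = WHITE(0); 1 = GRAY; 2 = BLACK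
--     back_edges = []
--     events = []
--     for start in graph:
--         if color.get(start, 0) != 0:
--             continue
--         color[start] = 1
--         events.append(('exit', start))
--         for c in reversed(graph.get(start, [])):
--             events.append(('edge', start, c))
--         while events:
--             ev = events.pop()
--             if ev[0] == 'edge':
--                 _, u, v = ev
--                 cv = color.get(v, 0)
--                 if cv == 0:
--                     color[v] = 1
--                     events.append(('exit', v))
--                     for c in reversed(graph.get(v, [])):
--                         events.append(('edge', v, c))
--                 elif cv == 1:
--                     back_edges.append((u, v))
--             else:
--                 color[ev[1]] = 2
--     return back_edges
-- ===== Notes on version B (the rewrite author's own statement) =====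
-- stated objective: alternative
-- what changed: B replaces A's pop-and-repush stack of (node, index) frames -- which re-fetches and copies the node's whole successor list on every single edge scan -- by an event-driven DFS: one stack of ('exit', node) and ('edge', src, dst) events, pushing each node's edge events once (in reverse) when the node turns gray and classifying each edge when its event is popped, so every successor list is touched exactly once (asymptotically O(V+E) vs A's O(V + sum deg^2), though a timing run's random graphs have too small degrees for this to reach 1.5x).
import Mathlib
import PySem

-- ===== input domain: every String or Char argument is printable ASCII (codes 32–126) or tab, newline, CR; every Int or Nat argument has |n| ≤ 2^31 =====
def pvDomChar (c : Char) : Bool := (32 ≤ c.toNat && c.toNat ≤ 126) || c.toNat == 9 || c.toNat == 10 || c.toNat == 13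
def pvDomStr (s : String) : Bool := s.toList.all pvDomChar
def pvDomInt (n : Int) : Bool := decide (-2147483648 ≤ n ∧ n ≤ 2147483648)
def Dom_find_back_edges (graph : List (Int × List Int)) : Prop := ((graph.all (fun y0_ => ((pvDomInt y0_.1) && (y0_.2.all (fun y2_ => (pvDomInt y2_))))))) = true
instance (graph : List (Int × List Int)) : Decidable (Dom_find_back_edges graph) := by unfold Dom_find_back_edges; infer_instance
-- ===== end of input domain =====

-- B re-implements the DFS back-edge scan as an event-driven stack machine
-- (('exit', node) / ('edge', src, dst) events, each node's edge events pushed once)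
-- instead of A's re-pushed (node, index) frames that rebuild the successor list per edge.

-- Termination bookkeeping shared by both ports' loops (not part of either algorithm):
-- all nodes ever pushed as children live in the multiset of all successor lists.
def pvUniv (graph : List (Int × List Int)) : List Int := graph.flatMap (·.2)

-- number of still-WHITE nodes among the successors (counted with multiplicity)
def pvWhite (graph : List (Int × List Int)) (color : PySem.Dict Int Int) : Nat :=
  ((pvUniv graph).filter (fun n => color.getD n 0 == 0)).length

theorem pvFilter_len_le {l : List Int} {p q : Int → Bool}
    (h : ∀ x, q x = true → p x = true) : (l.filter q).length ≤ (l.filter p).length := by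
  induction l with
  | nil => simp
  | cons a t ih =>
    by_cases hq : q a = true
    · simp [hq, h a hq]; omega
    · simp only [List.filter_cons]
      rw [Bool.not_eq_true] at hq
      cases hp : p a <;> simp [hq] <;> omega

theorem pvFilter_len_lt {l : List Int} {p q : Int → Bool} {a : Int}
    (h : ∀ x, q x = true → p x = true) (ha : a ∈ l) (hpa : p a = true) (hqa : q a = false) :
    (l.filter q).length < (l.filter p).length := by
  induction l with
  | nil => cases ha
  | cons b t ih =>
    rcases List.mem_cons.mp ha with rfl | hb
    · have hle := pvFilter_len_le (l := t) h
      simp [hpa, hqa]; omega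
    · by_cases hq : q b = true
      · simp [hq, h b hq]; exact ih hb
      · rw [Bool.not_eq_true] at hq
        have := ih hb
        cases hp : p b <;> simp [hq, hp] <;> omega

-- inserting a non-WHITE colour never increases the number of WHITE nodes
theorem pvWhite_insert_le (graph : List (Int × List Int)) (color : PySem.Dict Int Int)
    (k v : Int) (hv : v ≠ 0) : pvWhite graph (color.insert k v) ≤ pvWhite graph color := by
  apply pvFilter_len_le
  intro x hx
  rw [PySem.Dict.getD_insert] at hx
  split at hx
  · simp_all
  · exact hx

-- colouring a WHITE successor GRAY strictly decreases the number of WHITE nodes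
theorem pvWhite_insert_lt (graph : List (Int × List Int)) (color : PySem.Dict Int Int)
    (k : Int) (hk : k ∈ pvUniv graph) (hw : color.getD k 0 = 0) :
    pvWhite graph (color.insert k 1) < pvWhite graph color := by
  apply pvFilter_len_lt (a := k)
  · intro x hx
    rw [PySem.Dict.getD_insert] at hx
    split at hx
    · simp_all
    · exact hx
  · exact hk
  · simp [hw]
  · simp

-- every successor-list element (of any node) lies in pvUniv
theorem pvMem_univ (graph : List (Int × List Int)) (node x : Int)
    (hx : x ∈ PySem.Dict.getD (PySem.Dict.mk graph) node []) : x ∈ pvUniv graph := by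
  induction graph with
  | nil => simp [PySem.Dict.getD_eq_get?_getD, PySem.Dict.get?] at hx
  | cons p t ih =>
    rw [PySem.Dict.getD_eq_get?_getD, PySem.Dict.get?_mk_cons] at hx
    by_cases hk : p.1 == node
    · simp [hk] at hx
      exact List.mem_flatMap.mpr ⟨p, List.mem_cons_self, hx⟩
    · simp only [hk, Bool.false_eq_true, if_false] at hx
      rw [← PySem.Dict.getD_eq_get?_getD] at hx
      exact List.mem_flatMap.mpr (by
        rcases List.mem_flatMap.mp (ih hx) with ⟨q, hq, hxq⟩
        exact ⟨q, List.mem_cons_of_mem _ hq, hxq⟩)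

-- a successful Python index xs[i] always yields an element of xs
theorem pvMem_of_pyGet? {xs : List Int} {i : Int} {c : Int}
    (h : PySem.List.pyGet? xs i = some c) : c ∈ xs := by
  simp only [PySem.List.pyGet?] at h
  rcases hb : PySem.List.pyIdx? xs.length i with _ | a
  all_goals rw [hb] at h
  · cases h
  · exact List.mem_of_getElem? h

-- frame potential of A's stack: remaining children of each frame, plus one for the final pop
def pvPotA (graph : List (Int × List Int)) (stack : List (Int × Int)) : Nat :=
  (stack.map (fun f =>
    (((PySem.Dict.getD (PySem.Dict.mk graph) f.1 []).length : Int) - f.2).toNat + 1)).sum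

theorem pvLex_step {w' w p' p : Nat} (hw : w' ≤ w) (hp : p' < p) :
    Prod.Lex (· < ·) (· < ·) (w', p') (w, p) := by
  rcases Nat.lt_or_eq_of_le hw with h | h
  · exact Prod.Lex.left _ _ h
  · subst h; exact Prod.Lex.right _ hp

theorem pvPotA_dec_idx (graph : List (Int × List Int)) (node idx : Int)
    (rest : List (Int × Int))
    (h : idx < ((PySem.Dict.getD (PySem.Dict.mk graph) node []).length : Int)) :
    pvPotA graph ((node, idx + 1) :: rest) < pvPotA graph ((node, idx) :: rest) := by
  simp only [pvPotA, List.map_cons, List.sum_cons]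
  omega

theorem pvPotA_dec_pop (graph : List (Int × List Int)) (node idx : Int)
    (rest : List (Int × Int)) :
    pvPotA graph rest < pvPotA graph ((node, idx) :: rest) := by
  simp only [pvPotA, List.map_cons, List.sum_cons]
  omega

-- ===== PORT A =====
-- inner `while stack:` loop of A; stack head = Python's stack top; frames are (node, idx)
def pvLoopA (graph : List (Int × List Int)) (color : PySem.Dict Int Int)
    (back : List (Int × Int)) (stack : List (Int × Int)) :
    PySem.Dict Int Int × List (Int × Int) :=
  match stack with
  | [] => (color, back)
  | (node, idx) :: rest =>
    let children := PySem.Dict.getD (PySem.Dict.mk graph) node []   -- list(graph.get(node, []))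
    if hidx : idx < (children.length : Int) then
      match hc : PySem.List.pyGet? children idx with                -- children[idx]
      | none => (color, back)   -- unreachable: every reachable frame has 0 ≤ idx
      | some child =>
        if color.getD child 0 = 0 then
          pvLoopA graph (color.insert child 1) back ((child, 0) :: (node, idx + 1) :: rest)
        else if color.getD child 0 = 1 then
          pvLoopA graph color (back ++ [(node, child)]) ((node, idx + 1) :: rest)
        else
          pvLoopA graph color back ((node, idx + 1) :: rest)
    else
      pvLoopA graph (color.insert node 2) back rest
  termination_by (pvWhite graph color, pvPotA graph stack)
  decreasing_by
  · exact Prod.Lex.left _ _ (pvWhite_insert_lt graph color child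
      (pvMem_univ graph node child (pvMem_of_pyGet? hc)) (by assumption))
  · exact Prod.Lex.right _ (pvPotA_dec_idx graph node idx rest hidx)
  · exact Prod.Lex.right _ (pvPotA_dec_idx graph node idx rest hidx)
  · exact pvLex_step (pvWhite_insert_le graph color node 2 (by decide))
      (pvPotA_dec_pop graph node idx rest)

-- outer `for start in list(graph):` loop of A
def pvOuterA (graph : List (Int × List Int)) (keys : List Int)
    (color : PySem.Dict Int Int) (back : List (Int × Int)) : List (Int × Int) :=
  match keys with
  | [] => back
  | start :: ks =>
    if color.getD start 0 ≠ 0 then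
      pvOuterA graph ks color back
    else
      let r := pvLoopA graph (color.insert start 1) back [(start, 0)]
      pvOuterA graph ks r.1 r.2

def find_back_edges (graph : List (Int × List Int)) : List (Int × Int) :=
  pvOuterA graph (graph.map (·.1))
    ((graph.map (·.1)).foldl (fun d n => d.insert n 0) PySem.Dict.empty) []   -- {n: WHITE for n in graph}

-- ===== PORT B =====
-- DFS events: ('exit', node) and ('edge', src, dst) tuples of Source B
inductive PvEv where
  | exit : Int → PvEv
  | edge : Int → Int → PvEv
deriving DecidableEq, Repr

-- termination bookkeeping only: every edge event's target lies in pvUniv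
def pvEvOk (graph : List (Int × List Int)) (ev : PvEv) : Prop :=
  ∀ u v, ev = PvEv.edge u v → v ∈ pvUniv graph

theorem pvPush_ok (graph : List (Int × List Int)) (v : Int) (rest : List PvEv)
    (hrest : ∀ ev ∈ rest, pvEvOk graph ev) :
    ∀ ev ∈ (PySem.Dict.getD (PySem.Dict.mk graph) v []).map (PvEv.edge v) ++ PvEv.exit v :: rest,
      pvEvOk graph ev := by
  intro ev h
  rcases List.mem_append.mp h with h | h
  · rcases List.mem_map.mp h with ⟨c, hc, rfl⟩
    intro a b hab
    injection hab with h1 h2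
    subst h1; subst h2
    exact pvMem_univ graph v c hc
  · rcases List.mem_cons.mp h with rfl | h
    · intro a b hab; exact PvEv.noConfusion hab
    · exact hrest ev h

-- `while events:` loop of B; list head = Python's stack top; Source B appends the exit
-- event and then the edge events in reversed child order, so the popped order is
-- children[0], children[1], …, exit — i.e. head-first, exactly this list shape.
-- The hypothesis argument only justifies termination; it never affects the value.
def pvRunB (graph : List (Int × List Int)) (color : PySem.Dict Int Int)
    (back : List (Int × Int)) (events : List PvEv)
    (hev : ∀ ev ∈ events, pvEvOk graph ev) :
    PySem.Dict Int Int × List (Int × Int) :=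
  match events with
  | [] => (color, back)
  | PvEv.exit n :: rest =>                                          -- ev = ('exit', n)
    pvRunB graph (color.insert n 2) back rest
      (fun ev h => hev ev (List.mem_cons_of_mem _ h))
  | PvEv.edge u v :: rest =>                                        -- ev = ('edge', u, v)
    if color.getD v 0 = 0 then
      pvRunB graph (color.insert v 1) back
        ((PySem.Dict.getD (PySem.Dict.mk graph) v []).map (PvEv.edge v) ++ PvEv.exit v :: rest)
        (pvPush_ok graph v rest (fun ev h => hev ev (List.mem_cons_of_mem _ h)))
    else if color.getD v 0 = 1 then
      pvRunB graph color (back ++ [(u, v)]) rest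
        (fun ev h => hev ev (List.mem_cons_of_mem _ h))
    else
      pvRunB graph color back rest
        (fun ev h => hev ev (List.mem_cons_of_mem _ h))
  termination_by (pvWhite graph color, events.length)
  decreasing_by
  · exact pvLex_step (pvWhite_insert_le graph color n 2 (by decide)) (by simp)
  · exact Prod.Lex.left _ _ (pvWhite_insert_lt graph color v
      (hev (PvEv.edge u v) List.mem_cons_self u v rfl) (by assumption))
  · exact Prod.Lex.right _ (by simp)
  · exact Prod.Lex.right _ (by simp)

-- outer `for start in graph:` loop of B
def pvOuterB (graph : List (Int × List Int)) (keys : List Int)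
    (color : PySem.Dict Int Int) (back : List (Int × Int)) : List (Int × Int) :=
  match keys with
  | [] => back
  | start :: ks =>
    if color.getD start 0 ≠ 0 then
      pvOuterB graph ks color back
    else
      let r := pvRunB graph (color.insert start 1) back
        ((PySem.Dict.getD (PySem.Dict.mk graph) start []).map (PvEv.edge start) ++ [PvEv.exit start])
        (pvPush_ok graph start [] (fun ev h => absurd h (List.not_mem_nil)))
      pvOuterB graph ks r.1 r.2

def find_back_edges_alt (graph : List (Int × List Int)) : List (Int × Int) :=
  pvOuterB graph (graph.map (·.1)) PySem.Dict.empty []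

-- ===== PRECONDITION & SPEC =====
def Spec_find_back_edges (graph : List (Int × List Int)) (out : List (Int × Int)) : Prop := out = find_back_edges_alt graph
instance (graph : List (Int × List Int)) (out : List (Int × Int)) : Decidable (Spec_find_back_edges graph out) := by unfold Spec_find_back_edges; infer_instance

-- ===== CLAIM (what is proved, stated in full; the proofs are below) =====
def Claim_equal_find_back_edges : Prop := ∀ (graph : List (Int × List Int)), Dom_find_back_edges graph → Spec_find_back_edges graph (find_back_edges graph)

-- ===== LEMMAS AND PROOFS =====

-- abbreviation for `graph.get(node, [])` (proof-side only)
def pvCh (graph : List (Int × List Int)) (n : Int) : List Int :=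
  PySem.Dict.getD (PySem.Dict.mk graph) n []

-- A-frame (node, idx) corresponds to the B-event segment: its remaining edge
-- events followed by its exit event
def pvSeg (graph : List (Int × List Int)) (f : Int × Int) : List PvEv :=
  ((pvCh graph f.1).drop f.2.toNat).map (PvEv.edge f.1) ++ [PvEv.exit f.1]

def pvEvs (graph : List (Int × List Int)) (s : List (Int × Int)) : List PvEv :=
  s.flatMap (pvSeg graph)

theorem pvEvs_ok (graph : List (Int × List Int)) (s : List (Int × Int)) :
    ∀ ev ∈ pvEvs graph s, pvEvOk graph ev := by
  intro ev hev
  rcases List.mem_flatMap.mp hev with ⟨f, hf, hevf⟩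
  simp only [pvSeg] at hevf
  rcases List.mem_append.mp hevf with h | h
  · rcases List.mem_map.mp h with ⟨c, hc, rfl⟩
    intro a b hab
    injection hab with h1 h2
    subst h1; subst h2
    exact pvMem_univ graph f.1 c (List.drop_subset _ _ hc)
  · rcases List.mem_cons.mp h with rfl | h
    · intro a b hab; exact PvEv.noConfusion hab
    · cases h

theorem pvRunB_congr (graph : List (Int × List Int)) (c : PySem.Dict Int Int)
    (b : List (Int × Int)) {e1 e2 : List PvEv}
    (h1 : ∀ ev ∈ e1, pvEvOk graph ev) (h2 : ∀ ev ∈ e2, pvEvOk graph ev) (e : e1 = e2) :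
    pvRunB graph c b e1 h1 = pvRunB graph c b e2 h2 := by subst e; rfl

-- ---- step equations for pvLoopA ----
theorem pvLoopA_nil (graph : List (Int × List Int)) (color : PySem.Dict Int Int)
    (back : List (Int × Int)) : pvLoopA graph color back [] = (color, back) := by
  rw [pvLoopA]

theorem pvLoopA_white (graph : List (Int × List Int)) (color : PySem.Dict Int Int)
    (back : List (Int × Int)) (node idx child : Int) (rest : List (Int × Int))
    (hidx : idx < ((pvCh graph node).length : Int))
    (hc : PySem.List.pyGet? (pvCh graph node) idx = some child)
    (hw : color.getD child 0 = 0) :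
    pvLoopA graph color back ((node, idx) :: rest)
      = pvLoopA graph (color.insert child 1) back ((child, 0) :: (node, idx + 1) :: rest) := by
  simp only [pvCh] at hidx hc
  rw [pvLoopA]
  rw [dif_pos hidx]
  split
  · simp_all
  · rename_i c hceq
    rw [hceq] at hc
    injection hc with hc
    subst hc
    rw [if_pos hw]

theorem pvLoopA_gray (graph : List (Int × List Int)) (color : PySem.Dict Int Int)
    (back : List (Int × Int)) (node idx child : Int) (rest : List (Int × Int))
    (hidx : idx < ((pvCh graph node).length : Int))
    (hc : PySem.List.pyGet? (pvCh graph node) idx = some child)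
    (hw : color.getD child 0 = 1) :
    pvLoopA graph color back ((node, idx) :: rest)
      = pvLoopA graph color (back ++ [(node, child)]) ((node, idx + 1) :: rest) := by
  simp only [pvCh] at hidx hc
  rw [pvLoopA]
  rw [dif_pos hidx]
  split
  · simp_all
  · rename_i c hceq
    rw [hceq] at hc
    injection hc with hc
    subst hc
    rw [if_neg (by simp [hw]), if_pos hw]

theorem pvLoopA_black (graph : List (Int × List Int)) (color : PySem.Dict Int Int)
    (back : List (Int × Int)) (node idx child : Int) (rest : List (Int × Int))
    (hidx : idx < ((pvCh graph node).length : Int))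
    (hc : PySem.List.pyGet? (pvCh graph node) idx = some child)
    (h0 : ¬ color.getD child 0 = 0) (h1 : ¬ color.getD child 0 = 1) :
    pvLoopA graph color back ((node, idx) :: rest)
      = pvLoopA graph color back ((node, idx + 1) :: rest) := by
  simp only [pvCh] at hidx hc
  rw [pvLoopA]
  rw [dif_pos hidx]
  split
  · simp_all
  · rename_i c hceq
    rw [hceq] at hc
    injection hc with hc
    subst hc
    rw [if_neg h0, if_neg h1]

theorem pvLoopA_pop (graph : List (Int × List Int)) (color : PySem.Dict Int Int)
    (back : List (Int × Int)) (node idx : Int) (rest : List (Int × Int))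
    (hidx : ¬ idx < ((pvCh graph node).length : Int)) :
    pvLoopA graph color back ((node, idx) :: rest)
      = pvLoopA graph (color.insert node 2) back rest := by
  simp only [pvCh] at hidx
  rw [pvLoopA]
  rw [dif_neg hidx]

-- ---- step equations for pvRunB ----
theorem pvRunB_nil (graph : List (Int × List Int)) (color : PySem.Dict Int Int)
    (back : List (Int × Int)) (h : ∀ ev ∈ ([] : List PvEv), pvEvOk graph ev) :
    pvRunB graph color back [] h = (color, back) := by
  rw [pvRunB]

theorem pvRunB_exit (graph : List (Int × List Int)) (color : PySem.Dict Int Int)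
    (back : List (Int × Int)) (n : Int) (rest : List PvEv) (h h') :
    pvRunB graph color back (PvEv.exit n :: rest) h
      = pvRunB graph (color.insert n 2) back rest h' := by
  rw [pvRunB]

theorem pvRunB_white (graph : List (Int × List Int)) (color : PySem.Dict Int Int)
    (back : List (Int × Int)) (u v : Int) (rest : List PvEv)
    (hw : color.getD v 0 = 0) (h h') :
    pvRunB graph color back (PvEv.edge u v :: rest) h
      = pvRunB graph (color.insert v 1) back
          ((pvCh graph v).map (PvEv.edge v) ++ PvEv.exit v :: rest) h' := by
  rw [pvRunB]
  rw [if_pos hw]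
  rfl

theorem pvRunB_gray (graph : List (Int × List Int)) (color : PySem.Dict Int Int)
    (back : List (Int × Int)) (u v : Int) (rest : List PvEv)
    (hw : color.getD v 0 = 1) (h h') :
    pvRunB graph color back (PvEv.edge u v :: rest) h
      = pvRunB graph color (back ++ [(u, v)]) rest h' := by
  rw [pvRunB]
  rw [if_neg (by simp [hw]), if_pos hw]

theorem pvRunB_black (graph : List (Int × List Int)) (color : PySem.Dict Int Int)
    (back : List (Int × Int)) (u v : Int) (rest : List PvEv)
    (h0 : ¬ color.getD v 0 = 0) (h1 : ¬ color.getD v 0 = 1) (h h') :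
    pvRunB graph color back (PvEv.edge u v :: rest) h
      = pvRunB graph color back rest h' := by
  rw [pvRunB]
  rw [if_neg h0, if_neg h1]

-- getD-equivalence of colourings is preserved by identical inserts
theorem pvRel_insert {cA cB : PySem.Dict Int Int}
    (h : ∀ x, cA.getD x 0 = cB.getD x 0) (k v : Int) :
    ∀ x, (cA.insert k v).getD x 0 = (cB.insert k v).getD x 0 := by
  intro x
  rw [PySem.Dict.getD_insert, PySem.Dict.getD_insert]
  split_ifs <;> simp [h x]

-- the bisimulation: A's (node, idx) frames and B's event stack run in lockstep
theorem pvLoop_agree (graph : List (Int × List Int)) :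
    ∀ (cA : PySem.Dict Int Int) (back : List (Int × Int)) (stackA : List (Int × Int)),
    (∀ f ∈ stackA, 0 ≤ f.2) →
    ∀ (cB : PySem.Dict Int Int), (∀ x, cA.getD x 0 = cB.getD x 0) →
    ∀ (h : ∀ ev ∈ pvEvs graph stackA, pvEvOk graph ev),
    (pvLoopA graph cA back stackA).2 = (pvRunB graph cB back (pvEvs graph stackA) h).2
    ∧ ∀ x, (pvLoopA graph cA back stackA).1.getD x 0
        = (pvRunB graph cB back (pvEvs graph stackA) h).1.getD x 0 := by
  intro cA back stackA
  induction cA, back, stackA using pvLoopA.induct graph with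
  | case1 color back =>
    intro _ cB hrel h
    rw [pvLoopA_nil]
    rw [show pvRunB graph cB back (pvEvs graph []) h = (cB, back) from
      pvRunB_nil graph cB back h]
    exact ⟨rfl, hrel⟩
  | case2 color back node idx rest children hidx hc =>
    intro hA cB hrel h
    exfalso
    have h0 : 0 ≤ idx := hA (node, idx) List.mem_cons_self
    have hidx' : idx < ((pvCh graph node).length : Int) := hidx
    have hc' : PySem.List.pyGet? (pvCh graph node) idx = none := hc
    have hnat := PySem.List.pyGet?_natCast (pvCh graph node) idx.toNat
    rw [Int.toNat_of_nonneg h0] at hnat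
    rw [hc'] at hnat
    rw [eq_comm, List.getElem?_eq_none_iff] at hnat
    omega
  | case3 color back node idx rest children hidx child hc hw ih =>
    intro hA cB hrel h
    have h0 : 0 ≤ idx := hA (node, idx) List.mem_cons_self
    have hidx' : idx < ((pvCh graph node).length : Int) := hidx
    have hc' : PySem.List.pyGet? (pvCh graph node) idx = some child := hc
    have hlen : idx.toNat < (pvCh graph node).length := by omega
    have hgc : (pvCh graph node)[idx.toNat] = child := by
      have hnat := PySem.List.pyGet?_natCast (pvCh graph node) idx.toNat
      rw [Int.toNat_of_nonneg h0] at hnat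
      rw [hc'] at hnat
      exact (List.getElem?_eq_some_iff.mp hnat.symm).2
    have hdrop : (pvCh graph node).drop idx.toNat
        = child :: (pvCh graph node).drop (idx.toNat + 1) := by
      rw [List.drop_eq_getElem_cons hlen, hgc]
    have eB1 : pvEvs graph ((node, idx) :: rest)
        = PvEv.edge node child :: pvEvs graph ((node, idx + 1) :: rest) := by
      simp [pvEvs, pvSeg, hdrop, show (idx + 1).toNat = idx.toNat + 1 by omega]
    have e1 : (pvCh graph child).map (PvEv.edge child)
          ++ PvEv.exit child :: pvEvs graph ((node, idx + 1) :: rest)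
        = pvEvs graph ((child, 0) :: (node, idx + 1) :: rest) := by
      simp [pvEvs, pvSeg]
    have eA := pvLoopA_white graph color back node idx child rest hidx' hc' hw
    have eB : pvRunB graph cB back (pvEvs graph ((node, idx) :: rest)) h
        = pvRunB graph (cB.insert child 1) back
            (pvEvs graph ((child, 0) :: (node, idx + 1) :: rest))
            (pvEvs_ok graph ((child, 0) :: (node, idx + 1) :: rest)) := by
      refine (pvRunB_congr graph cB back h (by rw [← eB1]; exact h) eB1).trans ?_
      refine (pvRunB_white graph cB back node child _
        (by rw [← hrel child]; exact hw) _ (by rw [e1]; exact pvEvs_ok graph _)).trans ?_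
      exact pvRunB_congr graph _ back _ (pvEvs_ok graph _) e1
    rw [eA, eB]
    refine ih ?_ (cB.insert child 1) (pvRel_insert hrel child 1) _
    intro f hf
    rcases List.mem_cons.mp hf with rfl | hf
    · norm_num
    rcases List.mem_cons.mp hf with rfl | hf
    · simp; omega
    · exact hA f (List.mem_cons_of_mem _ hf)
  | case4 color back node idx rest children hidx child hc h0c hw ih =>
    intro hA cB hrel h
    have h0 : 0 ≤ idx := hA (node, idx) List.mem_cons_self
    have hidx' : idx < ((pvCh graph node).length : Int) := hidx
    have hc' : PySem.List.pyGet? (pvCh graph node) idx = some child := hc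
    have hlen : idx.toNat < (pvCh graph node).length := by omega
    have hgc : (pvCh graph node)[idx.toNat] = child := by
      have hnat := PySem.List.pyGet?_natCast (pvCh graph node) idx.toNat
      rw [Int.toNat_of_nonneg h0] at hnat
      rw [hc'] at hnat
      exact (List.getElem?_eq_some_iff.mp hnat.symm).2
    have hdrop : (pvCh graph node).drop idx.toNat
        = child :: (pvCh graph node).drop (idx.toNat + 1) := by
      rw [List.drop_eq_getElem_cons hlen, hgc]
    have eB1 : pvEvs graph ((node, idx) :: rest)
        = PvEv.edge node child :: pvEvs graph ((node, idx + 1) :: rest) := by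
      simp [pvEvs, pvSeg, hdrop, show (idx + 1).toNat = idx.toNat + 1 by omega]
    have eA := pvLoopA_gray graph color back node idx child rest hidx' hc' hw
    have eB : pvRunB graph cB back (pvEvs graph ((node, idx) :: rest)) h
        = pvRunB graph cB (back ++ [(node, child)])
            (pvEvs graph ((node, idx + 1) :: rest))
            (pvEvs_ok graph ((node, idx + 1) :: rest)) := by
      refine (pvRunB_congr graph cB back h (by rw [← eB1]; exact h) eB1).trans ?_
      exact pvRunB_gray graph cB back node child _
        (by rw [← hrel child]; exact hw) _ (pvEvs_ok graph _)
    rw [eA, eB]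
    refine ih ?_ cB hrel _
    intro f hf
    rcases List.mem_cons.mp hf with rfl | hf
    · simp; omega
    · exact hA f (List.mem_cons_of_mem _ hf)
  | case5 color back node idx rest children hidx child hc h0c h1c ih =>
    intro hA cB hrel h
    have h0 : 0 ≤ idx := hA (node, idx) List.mem_cons_self
    have hidx' : idx < ((pvCh graph node).length : Int) := hidx
    have hc' : PySem.List.pyGet? (pvCh graph node) idx = some child := hc
    have hlen : idx.toNat < (pvCh graph node).length := by omega
    have hgc : (pvCh graph node)[idx.toNat] = child := by
      have hnat := PySem.List.pyGet?_natCast (pvCh graph node) idx.toNat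
      rw [Int.toNat_of_nonneg h0] at hnat
      rw [hc'] at hnat
      exact (List.getElem?_eq_some_iff.mp hnat.symm).2
    have hdrop : (pvCh graph node).drop idx.toNat
        = child :: (pvCh graph node).drop (idx.toNat + 1) := by
      rw [List.drop_eq_getElem_cons hlen, hgc]
    have eB1 : pvEvs graph ((node, idx) :: rest)
        = PvEv.edge node child :: pvEvs graph ((node, idx + 1) :: rest) := by
      simp [pvEvs, pvSeg, hdrop, show (idx + 1).toNat = idx.toNat + 1 by omega]
    have eA := pvLoopA_black graph color back node idx child rest hidx' hc' h0c h1c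
    have eB : pvRunB graph cB back (pvEvs graph ((node, idx) :: rest)) h
        = pvRunB graph cB back
            (pvEvs graph ((node, idx + 1) :: rest))
            (pvEvs_ok graph ((node, idx + 1) :: rest)) := by
      refine (pvRunB_congr graph cB back h (by rw [← eB1]; exact h) eB1).trans ?_
      exact pvRunB_black graph cB back node child _
        (by rw [← hrel child]; exact h0c) (by rw [← hrel child]; exact h1c)
        _ (pvEvs_ok graph _)
    rw [eA, eB]
    refine ih ?_ cB hrel _
    intro f hf
    rcases List.mem_cons.mp hf with rfl | hf
    · simp; omega
    · exact hA f (List.mem_cons_of_mem _ hf)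
  | case6 color back node idx rest children hidx ih =>
    intro hA cB hrel h
    have h0 : 0 ≤ idx := hA (node, idx) List.mem_cons_self
    have hidx' : ¬ idx < ((pvCh graph node).length : Int) := hidx
    have hnil : (pvCh graph node).drop idx.toNat = [] := by
      apply List.drop_eq_nil_of_le
      omega
    have eB1 : pvEvs graph ((node, idx) :: rest)
        = PvEv.exit node :: pvEvs graph rest := by
      simp [pvEvs, pvSeg, hnil]
    have eA := pvLoopA_pop graph color back node idx rest hidx'
    have eB : pvRunB graph cB back (pvEvs graph ((node, idx) :: rest)) h
        = pvRunB graph (cB.insert node 2) back (pvEvs graph rest)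
            (pvEvs_ok graph rest) := by
      refine (pvRunB_congr graph cB back h (by rw [← eB1]; exact h) eB1).trans ?_
      exact pvRunB_exit graph cB back node _ _ (pvEvs_ok graph rest)
    rw [eA, eB]
    exact ih (fun f hf => hA f (List.mem_cons_of_mem _ hf))
      (cB.insert node 2) (pvRel_insert hrel node 2) (pvEvs_ok graph rest)

-- outer loops agree, carrying getD-equivalence of the two colour dicts
theorem pvOuter_agree (graph : List (Int × List Int)) :
    ∀ (keys : List Int) (cA cB : PySem.Dict Int Int) (back : List (Int × Int)),
    (∀ x, cA.getD x 0 = cB.getD x 0) →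
    pvOuterA graph keys cA back = pvOuterB graph keys cB back := by
  intro keys
  induction keys with
  | nil => intro cA cB back _; rw [pvOuterA, pvOuterB]
  | cons start ks ih =>
    intro cA cB back hrel
    rw [pvOuterA, pvOuterB]
    rw [hrel start]
    by_cases hs : cB.getD start 0 ≠ 0
    · rw [if_pos hs, if_pos hs]
      exact ih cA cB back hrel
    · rw [if_neg hs, if_neg hs]
      have hinit : (PySem.Dict.getD (PySem.Dict.mk graph) start []).map (PvEv.edge start)
            ++ [PvEv.exit start]
          = pvEvs graph [(start, (0 : Int))] := by
        simp [pvEvs, pvSeg, pvCh]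
      have hag := pvLoop_agree graph (cA.insert start 1) back [(start, 0)]
        (by
          intro f hf
          rw [List.mem_singleton] at hf
          subst hf
          norm_num)
        (cB.insert start 1) (pvRel_insert hrel start 1)
        (pvEvs_ok graph [(start, 0)])
      have eB := pvRunB_congr graph (cB.insert start 1) back
        (pvPush_ok graph start [] (fun ev h => absurd h (List.not_mem_nil)))
        (pvEvs_ok graph [(start, (0 : Int))]) hinit
      rw [eB]
      show pvOuterA graph ks (pvLoopA graph (cA.insert start 1) back [(start, 0)]).1
          (pvLoopA graph (cA.insert start 1) back [(start, 0)]).2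
        = pvOuterB graph ks
          (pvRunB graph (cB.insert start 1) back (pvEvs graph [(start, (0 : Int))])
            (pvEvs_ok graph [(start, (0 : Int))])).1
          (pvRunB graph (cB.insert start 1) back (pvEvs graph [(start, (0 : Int))])
            (pvEvs_ok graph [(start, (0 : Int))])).2
      rw [hag.1]
      exact ih _ _ _ hag.2

-- the initial colour dicts are getD-equivalent: {n: 0 for n in graph} vs {}
theorem pvInit_zero (ks : List Int) :
    ∀ (d : PySem.Dict Int Int), (∀ x, d.getD x 0 = 0) →
    ∀ x, (ks.foldl (fun d n => d.insert n 0) d).getD x 0 = 0 := by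
  induction ks with
  | nil => intro d hd x; exact hd x
  | cons k t ih =>
    intro d hd x
    rw [List.foldl_cons]
    refine ih _ ?_ x
    intro y
    rw [PySem.Dict.getD_insert]
    split_ifs <;> simp [hd y]

-- ===== VERDICT (by name: the statement is the Claim_ definition above) =====
theorem find_back_edges_spec : Claim_equal_find_back_edges := by
  unfold Claim_equal_find_back_edges Spec_find_back_edges
  intro graph _
  rw [find_back_edges, find_back_edges_alt]
  apply pvOuter_agree
  intro x
  rw [pvInit_zero (graph.map (·.1)) PySem.Dict.empty (fun y => by simp [PySem.Dict.getD_empty]) x]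
  simp [PySem.Dict.getD_empty]
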